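-- pv_equiv track=rewrite | github.com/Zhiyu-Wang-2021/Tableau | test.py | _clean_double_neg
-- ===== SOURCE A (Python) =====
-- def _clean_double_neg(this_fmla):
--     rlt = []
--     for c in this_fmla:
--         if c == '-' and len(rlt) > 0 and rlt[-1] == '-':
--             rlt.pop()
--         else:
--             rlt.append(c)
--     return ''.join(rlt)
-- ===== SOURCE B (Python) =====
-- from itertools import groupby
--
-- def _clean_double_neg(this_fmla):
--     pieces = []
--     for key, grp in groupby(this_fmla):
--         n = len(list(grp))
--         pieces.append('-' * (n % 2) if key == '-' else key * n)
--     return ''.join(pieces)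
-- ===== Notes on version B (the rewrite author's own statement) =====
-- stated objective: simpler
-- what changed: Replaces the push/pop stack over single characters by grouping maximal runs with itertools.groupby and emitting each run's parity ('-' runs) or the run itself in one step.
import Mathlib
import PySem

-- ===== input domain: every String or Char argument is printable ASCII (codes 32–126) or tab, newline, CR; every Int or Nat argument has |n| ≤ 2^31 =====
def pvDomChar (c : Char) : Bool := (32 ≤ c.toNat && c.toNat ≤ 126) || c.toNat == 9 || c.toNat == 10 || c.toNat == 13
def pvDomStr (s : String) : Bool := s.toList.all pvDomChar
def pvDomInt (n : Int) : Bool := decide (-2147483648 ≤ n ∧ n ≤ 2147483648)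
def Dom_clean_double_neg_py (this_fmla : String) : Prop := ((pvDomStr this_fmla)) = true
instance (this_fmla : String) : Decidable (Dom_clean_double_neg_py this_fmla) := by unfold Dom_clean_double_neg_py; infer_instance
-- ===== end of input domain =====

-- B replaces A's per-character push/pop stack by grouping maximal runs and emitting each
-- run's parity ('-' runs) or the run itself; objective: simpler.

-- ===== PORT A =====
-- one loop step of A: pop on a second consecutive '-', else append
def pvStepA (rlt : List Char) (c : Char) : List Char :=
  if c = '-' ∧ rlt ≠ [] ∧ rlt.getLast? = some '-' then rlt.dropLast else rlt ++ [c]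

def clean_double_neg_py (this_fmla : String) : String :=
  String.mk (this_fmla.toList.foldl pvStepA [])

-- ===== PORT B =====
-- maximal runs of equal characters, as itertools.groupby yields them
def pvRuns : List Char → List (List Char)
  | [] => []
  | c :: cs => (c :: cs.takeWhile (· == c)) :: pvRuns (cs.dropWhile (· == c))
termination_by l => l.length
decreasing_by simpa using Nat.lt_succ_of_le (List.length_dropWhile_le _ _)

-- the piece emitted for one (key, group): parity for '-', the whole run otherwise
def pvPiece (g : List Char) : List Char :=
  if g.head? = some '-' then List.replicate (g.length % 2) '-' else g

def clean_double_neg_py_alt (this_fmla : String) : String :=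
  String.mk ((pvRuns this_fmla.toList).flatMap pvPiece)

-- ===== PRECONDITION & SPEC =====
def Spec_clean_double_neg_py (this_fmla : String) (out : String) : Prop := out = clean_double_neg_py_alt this_fmla
instance (this_fmla : String) (out : String) : Decidable (Spec_clean_double_neg_py this_fmla out) := by unfold Spec_clean_double_neg_py; infer_instance

-- ===== CLAIM (what is proved, stated in full; the proofs are below) =====
def Claim_equal_clean_double_neg_py : Prop := ∀ (this_fmla : String), Dom_clean_double_neg_py this_fmla → Spec_clean_double_neg_py this_fmla (clean_double_neg_py this_fmla)

-- ===== LEMMAS AND PROOFS =====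

-- a non-dash run just gets appended, character by character
lemma foldl_stepA_replicate_ne (c : Char) (hc : c ≠ '-') :
    ∀ (k : ℕ) (acc : List Char),
      (List.replicate k c).foldl pvStepA acc = acc ++ List.replicate k c := by
  intro k
  induction k with
  | zero => intro acc; simp
  | succ k ih =>
      intro acc
      rw [List.replicate_succ, List.foldl_cons, ih]
      have : pvStepA acc c = acc ++ [c] := by
        unfold pvStepA; rw [if_neg]; simp [hc]
      rw [this]
      simp

-- a dash run reduces to its parity when the accumulator does not end in '-'
lemma foldl_stepA_replicate_dash :
    ∀ (k : ℕ) (acc : List Char), acc.getLast? ≠ some '-' →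
      (List.replicate k '-').foldl pvStepA acc = acc ++ List.replicate (k % 2) '-' := by
  intro k
  induction k using Nat.strong_induction_on with
  | _ k ih =>
      intro acc hacc
      match k with
      | 0 => simp
      | 1 =>
          simp only [List.replicate_succ, List.replicate_zero, List.foldl_cons, List.foldl_nil]
          unfold pvStepA
          rw [if_neg (by rintro ⟨-, -, h⟩; exact hacc h)]
      | (k + 2) =>
          have h1 : pvStepA acc '-' = acc ++ ['-'] := by
            unfold pvStepA; rw [if_neg]; rintro ⟨-, -, h⟩; exact hacc h
          have h2 : pvStepA (acc ++ ['-']) '-' = acc := by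
            unfold pvStepA; rw [if_pos] <;> simp
          rw [List.replicate_succ, List.replicate_succ, List.foldl_cons, List.foldl_cons,
            h1, h2, ih k (by omega) acc hacc]
          have : (k + 2) % 2 = k % 2 := by omega
          rw [this]

-- every element of takeWhile (· == c) equals c, so the run is literally a replicate
lemma takeWhile_eq_replicate (c : Char) (cs : List Char) :
    cs.takeWhile (· == c) = List.replicate (cs.takeWhile (· == c)).length c := by
  rw [List.eq_replicate_iff]
  refine ⟨rfl, fun b hb => ?_⟩
  simpa using List.mem_takeWhile_imp hb

-- the head of dropWhile (· == c) is not c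
lemma head?_dropWhile_ne (c : Char) (cs : List Char) :
    (cs.dropWhile (· == c)).head? ≠ some c := by
  induction cs with
  | nil => simp
  | cons a as ih =>
      by_cases h : a = c
      · have hb : (a == c) = true := by simp [h]
        simpa [List.dropWhile, hb] using ih
      · have hb : (a == c) = false := by simp [h]
        simp only [List.dropWhile, hb, List.head?_cons, ne_eq, Option.some.injEq]
        exact h

-- the main invariant: folding A's step over l from acc yields acc ++ B's pieces,
-- provided acc does not end in '-' whenever l starts with '-'
lemma main_invariant :
    ∀ (l acc : List Char), (l.head? = some '-' → acc.getLast? ≠ some '-') →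
      l.foldl pvStepA acc = acc ++ (pvRuns l).flatMap pvPiece := by
  intro l
  induction l using pvRuns.induct with
  | case1 => intro acc _; simp [pvRuns]
  | case2 c cs ih =>
      intro acc hacc
      obtain ⟨n, hn⟩ : ∃ n, cs.takeWhile (· == c) = List.replicate n c :=
        ⟨_, takeWhile_eq_replicate c cs⟩
      have hrun : c :: cs.takeWhile (· == c) = List.replicate (n + 1) c := by
        rw [hn, List.replicate_succ]
      have hsplit : c :: cs = List.replicate (n + 1) c ++ cs.dropWhile (· == c) := by
        conv_lhs => rw [← List.takeWhile_append_dropWhile (p := (· == c)) (l := cs)]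
        rw [← hrun]
        rfl
      rw [pvRuns]
      simp only [List.flatMap_cons]
      rw [hrun, hsplit, List.foldl_append]
      by_cases hc : c = '-'
      · subst hc
        have hend : acc.getLast? ≠ some '-' := hacc rfl
        rw [foldl_stepA_replicate_dash (n + 1) acc hend,
          ih _ (fun h => absurd h (head?_dropWhile_ne '-' cs)),
          List.append_assoc]
        congr 2
        unfold pvPiece
        rw [if_pos (by simp [List.replicate_succ])]
        simp
      · rw [foldl_stepA_replicate_ne c hc (n + 1) acc]
        have hlast : (acc ++ List.replicate (n + 1) c).getLast? = some c := by
          rw [List.replicate_succ', ← List.append_assoc, List.getLast?_concat]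
        rw [ih _ (fun _ hx => absurd hlast (by rw [hx]; simp; exact fun h => hc h.symm)),
          List.append_assoc]
        congr 2
        unfold pvPiece
        rw [if_neg (by simp [List.replicate_succ, hc])]

-- ===== VERDICT (by name: the statement is the Claim_ definition above) =====
theorem clean_double_neg_py_spec : Claim_equal_clean_double_neg_py := by
  intro s _
  unfold Spec_clean_double_neg_py clean_double_neg_py clean_double_neg_py_alt
  rw [main_invariant s.toList [] (by simp)]
  simp
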